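-- pv_equiv track=rewrite | github.com/dertilo/coding | redbaron_type_hinting/parse_seq_to_tree.py | eat_node
-- ===== SOURCE A (Python) =====
-- from typing import List, Dict, Union, Generator
--
-- END = "<END>"
--
-- STOP_SIGNS = ["[", ",", "]", END]
--
-- def eat_node(seq: List[str]):
--     assert len(seq) > 0
--     x = seq.pop(0)
--     node = ""
--     while x not in STOP_SIGNS and len(seq) > 0:
--         node += x
--         x = seq.pop(0)
--
--     if len(seq) == 0 and x not in STOP_SIGNS:
--         node += x
--         x = END
--     elif len(node) == 0:
--         node = None
--     elif x in STOP_SIGNS: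
--         pass
--     else:
--         assert False
--
--     return node, x
-- ===== SOURCE B (Python) =====
-- from typing import List
--
-- END = "<END>"
--
-- STOP_SIGNS = ["[", ",", "]", END]
--
-- def eat_node(seq: List[str]):
--     assert len(seq) > 0
--     i = next((k for k, t in enumerate(seq) if t in STOP_SIGNS), None)
--     if i is None:
--         node = "".join(seq)
--         x = END
--         del seq[:]
--     else:
--         node = "".join(seq[:i]) or None
--         x = seq[i]
--         del seq[:i + 1]
--     return node, x
-- ===== Notes on version B (the rewrite author's own statement) =====
-- stated objective: alternative
-- what changed: Replaces A's pop(0)-driven accumulation loop and four-way branch epilogue with a single scan for the first stop-sign index followed by join/slice (node = join(seq[:i]) or None, x = seq[i] or END); same in-place consumption via del.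
import Mathlib
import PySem

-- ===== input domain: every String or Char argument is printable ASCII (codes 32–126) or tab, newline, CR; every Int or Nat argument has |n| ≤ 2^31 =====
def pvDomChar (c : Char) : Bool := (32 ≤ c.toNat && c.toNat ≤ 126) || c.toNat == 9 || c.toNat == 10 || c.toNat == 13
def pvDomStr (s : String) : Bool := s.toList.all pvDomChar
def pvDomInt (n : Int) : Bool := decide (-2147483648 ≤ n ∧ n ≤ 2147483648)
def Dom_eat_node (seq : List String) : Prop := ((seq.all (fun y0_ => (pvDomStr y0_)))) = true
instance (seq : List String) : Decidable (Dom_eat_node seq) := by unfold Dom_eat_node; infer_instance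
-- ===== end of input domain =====

-- B finds the first stop-sign index and joins/slices instead of A's pop(0) loop; equivalence is about
-- the RETURN value (both Pythons also consume the same prefix of seq in place).

-- ===== PORT A =====
def pvEND : String := "<END>"

def pvSTOPS : List String := ["[", ",", "]", pvEND]

-- the `while x not in STOP_SIGNS and len(seq) > 0` loop plus A's epilogue branches
def eatLoopA (node x : String) : List String → Option String × String
  | [] =>
    -- loop exits with seq empty (or x a stop sign); epilogue in A's branch order
    if x ∉ pvSTOPS then (some (node ++ x), pvEND)
    else if node = "" then (none, x)
    else (some node, x)
  | r :: rs =>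
    if x ∉ pvSTOPS then eatLoopA (node ++ x) r rs
    else if node = "" then (none, x)
    else (some node, x)

def eat_node (seq : List String) : Option String × String :=
  match seq with
  | [] => (none, "")          -- Python raises AssertionError here; excluded by Pre_
  | x :: rest => eatLoopA "" x rest

-- ===== PORT B =====
-- "".join, transliterated
def pvJoin : List String → String
  | [] => ""
  | s :: rest => s ++ pvJoin rest

def eat_node_alt (seq : List String) : Option String × String :=
  match seq.findIdx? (fun t => t ∈ pvSTOPS) with
  | none => (some (pvJoin seq), pvEND)
  | some i =>
    let node := pvJoin (seq.take i)
    ((if node = "" then none else some node), seq.getD i "")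

-- ===== PRECONDITION & SPEC =====
-- A asserts len(seq) > 0; the empty list raises AssertionError.
def Pre_eat_node (seq : List String) : Prop := seq ≠ []
instance (seq : List String) : Decidable (Pre_eat_node seq) := by unfold Pre_eat_node; infer_instance
def pvWitness_eat_node : List String := (["a", "b", ","])
def Spec_eat_node (seq : List String) (out : Option String × String) : Prop := out = eat_node_alt seq
instance (seq : List String) (out : Option String × String) : Decidable (Spec_eat_node seq out) := by unfold Spec_eat_node; infer_instance

-- ===== CLAIM (what is proved, stated in full; the proofs are below) =====
def Claim_equal_eat_node : Prop := ∀ (seq : List String), Dom_eat_node seq → Pre_eat_node seq → Spec_eat_node seq (eat_node seq)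

-- ===== LEMMAS AND PROOFS =====

-- A's loop, characterised by the first stop-sign index of the remaining tokens
theorem eatLoopA_eq (rest : List String) : ∀ (node x : String),
    eatLoopA node x rest =
      if x ∈ pvSTOPS then ((if node = "" then none else some node), x)
      else
        match rest.findIdx? (fun t => t ∈ pvSTOPS) with
        | none => (some (node ++ x ++ pvJoin rest), pvEND)
        | some i =>
          let n := node ++ x ++ pvJoin (rest.take i)
          ((if n = "" then none else some n), rest.getD i "") := by
  induction rest with
  | nil =>
    intro node x
    simp only [eatLoopA, List.findIdx?_nil, pvJoin]
    by_cases hx : x ∈ pvSTOPS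
    · simp [hx]
      split_ifs <;> rfl
    · simp [hx]
  | cons r rs ih =>
    intro node x
    by_cases hx : x ∈ pvSTOPS
    · simp [eatLoopA, hx]
      split_ifs <;> rfl
    · rw [show eatLoopA node x (r :: rs) = eatLoopA (node ++ x) r rs from by simp [eatLoopA, hx]]
      rw [ih]
      by_cases hr : r ∈ pvSTOPS
      · have : (r :: rs).findIdx? (fun t => t ∈ pvSTOPS) = some 0 := by
          simp [List.findIdx?_cons, hr]
        simp [hx, hr, this, pvJoin]
      · have : (r :: rs).findIdx? (fun t => t ∈ pvSTOPS)
            = (rs.findIdx? (fun t => t ∈ pvSTOPS)).map (· + 1) := by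
          simp [List.findIdx?_cons, hr]
        rw [this]
        cases hfi : rs.findIdx? (fun t => t ∈ pvSTOPS) with
        | none => simp [hx, hr, pvJoin, String.append_assoc]
        | some j => simp [hx, hr, pvJoin, String.append_assoc]

-- ===== VERDICT (by name: the statement is the Claim_ definition above) =====
theorem eat_node_spec : Claim_equal_eat_node := by
  intro seq _ hpre
  unfold Spec_eat_node
  match seq with
  | [] => exact absurd rfl hpre
  | x :: rest =>
    show eatLoopA "" x rest = eat_node_alt (x :: rest)
    rw [eatLoopA_eq]
    unfold eat_node_alt
    by_cases hx : x ∈ pvSTOPS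
    · have : (x :: rest).findIdx? (fun t => t ∈ pvSTOPS) = some 0 := by
        simp [List.findIdx?_cons, hx]
      simp [hx, this, pvJoin]
    · have : (x :: rest).findIdx? (fun t => t ∈ pvSTOPS)
          = (rest.findIdx? (fun t => t ∈ pvSTOPS)).map (· + 1) := by
        simp [List.findIdx?_cons, hx]
      rw [this]
      cases hfi : rest.findIdx? (fun t => t ∈ pvSTOPS) with
      | none => simp [hx, pvJoin]
      | some j => simp [hx, pvJoin]
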